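-- pv_equiv track=rewrite | github.com/RingCanary/coral-usb-oxidized | tools/instruction_word_field_analysis.py | _bit_ranges
-- ===== SOURCE A (Python) =====
-- from typing import Any, Dict, List, Optional, Sequence, Tuple
--
-- def _bit_ranges(mask: int) -> List[Tuple[int, int]]:
--     ranges: List[Tuple[int, int]] = []
--     b = 0
--     while b < 32:
--         if ((mask >> b) & 1) == 0:
--             b += 1
--             continue
--         start = b
--         while b < 32 and ((mask >> b) & 1) == 1:
--             b += 1
--         ranges.append((start, b - 1))
--     return ranges
-- ===== SOURCE B (Python) =====
-- def _bit_ranges(mask):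
--     # Bit-trick run extraction: isolate the lowest set bit to count trailing
--     # zeros, then the lowest clear bit to measure the length of the run of
--     # ones, emitting one (start, end) pair per run instead of scanning bits.
--     m = mask & 0xFFFFFFFF
--     ranges = []
--     base = 0
--     while m:
--         low = m - (m & (m - 1))           # lowest set bit of m (a power of two)
--         z = low.bit_length() - 1          # trailing-zero count
--         base += z
--         m >>= z                           # m is now odd: a run starts at base
--         low1 = (m + 1) - ((m + 1) & m)    # lowest CLEAR bit of m, i.e. 2**(run length)
--         t = low1.bit_length() - 1         # length of the run of ones
--         ranges.append((base, base + t - 1))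
--         base += t
--         m >>= t
--     return ranges
-- ===== Notes on version B (the rewrite author's own statement) =====
-- stated objective: alternative
-- what changed: A scans all 32 bit positions one by one with a nested while loop; B reduces the mask to 32 bits once and then extracts one contiguous run per loop iteration with bit tricks (isolate the lowest set bit to count trailing zeros, then the lowest clear bit to measure the run length), so the loop runs once per run instead of once per bit.
import Mathlib
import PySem

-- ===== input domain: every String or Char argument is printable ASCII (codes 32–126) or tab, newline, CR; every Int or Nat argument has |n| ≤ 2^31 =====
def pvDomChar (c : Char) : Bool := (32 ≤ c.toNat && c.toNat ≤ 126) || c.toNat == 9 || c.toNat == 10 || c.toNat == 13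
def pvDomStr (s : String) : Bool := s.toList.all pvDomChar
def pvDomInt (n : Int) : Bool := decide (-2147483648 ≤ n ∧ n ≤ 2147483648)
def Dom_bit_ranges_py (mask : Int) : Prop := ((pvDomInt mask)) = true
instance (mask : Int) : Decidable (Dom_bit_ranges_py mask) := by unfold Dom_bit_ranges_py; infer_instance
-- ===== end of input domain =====

-- B replaces A's per-bit nested scan of all 32 positions by bit-trick run extraction
-- (isolate lowest set / lowest clear bit, one loop iteration per contiguous run);
-- equivalence on the return value is proved for every Int mask.

-- ===== PORT A =====
-- inner 'while b < 32 and ((mask >> b) & 1) == 1: b += 1' of A; the fuel argument is a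
-- totality guard only: the loop advances b by 1 each step and stops at b = 32, so the
-- 32 units of fuel it is called with are never exhausted (proved in the lemmas below)
def runA (mask : Int) (fuel : Nat) (b : Nat) : Nat :=
  match fuel with
  | 0 => b
  | fuel + 1 =>
    if b < 32 ∧ PySem.Int.band (mask >>> b) 1 = 1 then runA mask fuel (b + 1) else b

-- outer 'while b < 32' loop of A; fuel 32 is again a pure totality guard (b strictly
-- increases each iteration, so at most 32 iterations happen before b = 32)
def scanA (mask : Int) (fuel : Nat) (b : Nat) : List (Int × Int) :=
  match fuel with
  | 0 => []
  | fuel + 1 =>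
    if b < 32 then
      if PySem.Int.band (mask >>> b) 1 = 0 then scanA mask fuel (b + 1)
      else ((b : Int), ((runA mask 32 b : Nat) : Int) - 1) :: scanA mask fuel (runA mask 32 b)
    else []

-- '(mask >> b) & 1' is ported with core Int >>> and PySem.Int.band (both Python-exact)
def bit_ranges_py (mask : Int) : List (Int × Int) := scanA mask 32 0

-- ===== PORT B =====
-- the 'while m:' loop of B; fuel 32 is a totality guard only: since m < 2^32 the loop
-- runs at most 16 times (each iteration consumes a whole run of set bits), proved below
def loopB (m : Int) (base : Int) (fuel : Nat) : List (Int × Int) :=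
  match fuel with
  | 0 => []
  | fuel + 1 =>
    if m = 0 then []
    else
      let low := m - PySem.Int.band m (m - 1)
      let z := PySem.Int.bitLength low - 1
      let base1 := base + (z : Int)
      let m1 := m >>> z
      let low1 := (m1 + 1) - PySem.Int.band (m1 + 1) m1
      let t := PySem.Int.bitLength low1 - 1
      (base1, base1 + (t : Int) - 1) :: loopB (m1 >>> t) (base1 + (t : Int)) fuel

def bit_ranges_py_alt (mask : Int) : List (Int × Int) :=
  loopB (PySem.Int.band mask 4294967295) 0 32

-- ===== PRECONDITION & SPEC =====
def Spec_bit_ranges_py (mask : Int) (out : List (Int × Int)) : Prop := out = bit_ranges_py_alt mask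
instance (mask : Int) (out : List (Int × Int)) : Decidable (Spec_bit_ranges_py mask out) := by unfold Spec_bit_ranges_py; infer_instance

-- ===== CLAIM (what is proved, stated in full; the proofs are below) =====
def Claim_equal_bit_ranges_py : Prop := ∀ (mask : Int), Dom_bit_ranges_py mask → Spec_bit_ranges_py mask (bit_ranges_py mask)

-- ===== LEMMAS AND PROOFS =====

-- trailing-zero count (proof-side notion only)
def tz (n : Nat) : Nat :=
  if n % 2 = 1 ∨ n = 0 then 0 else tz (n / 2) + 1
termination_by n
decreasing_by exact Nat.div_lt_self (by omega) (by omega)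

theorem tz_odd {n : Nat} (h : n % 2 = 1) : tz n = 0 := by rw [tz]; simp [h]

theorem tz_even {n : Nat} (h : n % 2 = 0) (h0 : n ≠ 0) : tz n = tz (n / 2) + 1 := by
  rw [tz]; simp [h, h0]

-- bit-doubling identities for &&&
theorem land_double (a b u v : Nat) (hu : u ≤ 1) (hv : v ≤ 1) :
    (2 * a + u) &&& (2 * b + v) = 2 * (a &&& b) + (u &&& v) := by
  apply Nat.eq_of_testBit_eq
  intro i
  have e1 : (2 * a + u) / 2 = a := by omega
  have e2 : (2 * b + v) / 2 = b := by omega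
  have e3 : (2 * (a &&& b) + (u &&& v)) / 2 = a &&& b := by
    have huv : u &&& v ≤ 1 := le_trans Nat.and_le_left hu
    omega
  cases i with
  | zero =>
    have m3 : (2 * (a &&& b) + (u &&& v)) % 2 = u &&& v := by
      have huv : u &&& v ≤ 1 := le_trans Nat.and_le_left hu
      omega
    simp only [Nat.testBit_zero, m3]
    interval_cases u <;> interval_cases v <;> simp
  | succ j =>
    rw [Nat.testBit_land, Nat.testBit_succ, Nat.testBit_succ, Nat.testBit_succ, e1, e2, e3,
      Nat.testBit_land]

-- N1: n - (n &&& (n-1)) isolates the lowest set bit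
theorem low_eq_pow_tz : ∀ n : Nat, n ≠ 0 → n - (n &&& (n - 1)) = 2 ^ tz n := by
  intro n
  induction n using Nat.strong_induction_on with
  | _ n IH =>
    intro h0
    by_cases hp : n % 2 = 1
    · obtain ⟨k, hk⟩ : ∃ k, n / 2 = k := ⟨_, rfl⟩
      have hb : n &&& (n - 1) = 2 * (k &&& k) + (1 &&& 0) := by
        have h1 : n - 1 = 2 * k + 0 := by omega
        have hn : n = 2 * k + 1 := by omega
        rw [h1]
        conv_lhs => rw [hn]
        exact land_double k k 1 0 (by omega) (by omega)
      rw [Nat.and_self] at hb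
      rw [tz_odd hp]
      have : (1 &&& 0 : Nat) = 0 := rfl
      omega
    · have hp0 : n % 2 = 0 := by omega
      have hk0 : n / 2 ≠ 0 := by omega
      obtain ⟨k, hk⟩ : ∃ k, n / 2 = k := ⟨_, rfl⟩
      have hb : n &&& (n - 1) = 2 * (k &&& (k - 1)) + (0 &&& 1) := by
        have h1 : n - 1 = 2 * (k - 1) + 1 := by omega
        have hn : n = 2 * k + 0 := by omega
        rw [h1]
        conv_lhs => rw [hn]
        exact land_double k (k - 1) 0 1 (by omega) (by omega)
      have IH' := IH (n / 2) (by omega) hk0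
      rw [hk] at IH'
      have hle : k &&& (k - 1) ≤ k := Nat.and_le_left
      rw [tz_even hp0 h0, hk, pow_succ]
      have : (0 &&& 1 : Nat) = 0 := rfl
      omega

-- N2: bits below tz n are clear, bit tz n is set
theorem testBit_lt_tz : ∀ n : Nat, n ≠ 0 → (∀ j, j < tz n → n.testBit j = false) ∧ n.testBit (tz n) = true := by
  intro n
  induction n using Nat.strong_induction_on with
  | _ n IH =>
    intro h0
    by_cases hp : n % 2 = 1
    · rw [tz_odd hp]
      exact ⟨fun j hj => by omega, by simp [Nat.testBit_zero, hp]⟩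
    · have hp0 : n % 2 = 0 := by omega
      have hk0 : n / 2 ≠ 0 := by omega
      obtain ⟨IH1, IH2⟩ := IH (n / 2) (by omega) hk0
      rw [tz_even hp0 h0]
      refine ⟨fun j hj => ?_, ?_⟩
      · cases j with
        | zero => simp [Nat.testBit_zero, hp0]
        | succ i => rw [Nat.testBit_succ]; exact IH1 i (by omega)
      · rw [Nat.testBit_succ]; exact IH2

-- N3: bits below tz (n+1) are set in n, bit tz (n+1) is clear
theorem testBit_lt_tz_succ : ∀ n : Nat, (∀ j, j < tz (n + 1) → n.testBit j = true) ∧ n.testBit (tz (n + 1)) = false := by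
  intro n
  induction n using Nat.strong_induction_on with
  | _ n IH =>
    by_cases hp : n % 2 = 1
    · have he : (n + 1) % 2 = 0 := by omega
      have h2 : (n + 1) / 2 = n / 2 + 1 := by omega
      rw [tz_even he (by omega), h2]
      obtain ⟨IH1, IH2⟩ := IH (n / 2) (by omega)
      refine ⟨fun j hj => ?_, ?_⟩
      · cases j with
        | zero => simp [Nat.testBit_zero, hp]
        | succ i => rw [Nat.testBit_succ]; exact IH1 i (by omega)
      · rw [Nat.testBit_succ]; exact IH2
    · have he : (n + 1) % 2 = 1 := by omega
      rw [tz_odd he]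
      exact ⟨fun j hj => by omega, by simp [Nat.testBit_zero]; omega⟩

-- N4
theorem pow_sub_one_le_of_testBit : ∀ t n : Nat, (∀ j, j < t → n.testBit j = true) → 2 ^ t - 1 ≤ n := by
  intro t
  induction t with
  | zero => intro n _; simp
  | succ t IH =>
    intro n h
    have h0 : n % 2 = 1 := by
      have := h 0 (by omega)
      simpa [Nat.testBit_zero] using this
    have hh : ∀ j, j < t → (n / 2).testBit j = true := fun j hj => by
      have := h (j + 1) (by omega)
      rwa [Nat.testBit_succ] at this
    have := IH (n / 2) hh
    have hpow : (2:Nat) ^ (t + 1) = 2 * 2 ^ t := by ring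
    omega

theorem bitLength_pow (k : Nat) : PySem.Int.bitLength ((2 ^ k : Nat) : Int) = k + 1 := by
  have hne : ((2 ^ k : Nat) : Int) ≠ 0 := by positivity
  have h1 := PySem.Int.lt_two_pow_bitLength ((2 ^ k : Nat) : Int)
  have h2 := PySem.Int.two_pow_bitLength_le ((2 ^ k : Nat) : Int) hne
  rw [Int.natAbs_natCast] at h1 h2
  have h1' := (Nat.pow_lt_pow_iff_right (a := 2) (by omega)).mp h1
  have h2' := (Nat.pow_le_pow_iff_right (a := 2) (by omega)).mp h2
  omega

-- the 32-bit reduction of the mask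
theorem band_mask_spec (mask : Int) :
    0 ≤ PySem.Int.band mask 4294967295 ∧
    (PySem.Int.band mask 4294967295).toNat < 4294967296 ∧
    ∃ q : Int, mask = ((PySem.Int.band mask 4294967295).toNat : Int) + 4294967296 * q := by
  have hmod : ∀ x : Nat, x &&& 4294967295 = x % 4294967296 := by
    intro x
    have := Nat.and_two_pow_sub_one_eq_mod x 32
    norm_num at this
    exact this
  rw [PySem.Int.band]
  by_cases ha : 0 ≤ mask
  · rw [if_pos ha, if_pos (by norm_num : (0:Int) ≤ 4294967295)]
    have ht : ((4294967295 : Int)).toNat = 4294967295 := rfl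
    rw [ht, hmod]
    refine ⟨by positivity, by omega, ((mask.toNat / 4294967296 : Nat) : Int), by omega⟩
  · rw [if_neg ha, if_pos (by norm_num : (0:Int) ≤ 4294967295)]
    have ht : ((4294967295 : Int)).toNat = 4294967295 := rfl
    rw [ht, Nat.land_comm, hmod]
    refine ⟨by positivity, by omega, -(((-mask - 1).toNat / 4294967296 : Nat) : Int) - 1, by omega⟩

-- A's bit test reads bit b of the 32-bit reduction (b < 32)
theorem pyBit_eq (mask : Int) (b : Nat) (hb : b < 32) :
    PySem.Int.band (mask >>> b) 1 =
      if ((PySem.Int.band mask 4294967295).toNat).testBit b then 1 else 0 := by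
  obtain ⟨hnn, hlt, q, hq⟩ := band_mask_spec mask
  set M := (PySem.Int.band mask 4294967295).toNat with hM
  rw [PySem.Int.band_one, PySem.Int.mod_eq_emod_of_pos (by omega), Int.shiftRight_eq_div_pow, hq]
  have hsplit : ((M : Int) + 4294967296 * q) / ((2 ^ b : Nat) : Int)
      = (M : Int) / ((2 ^ b : Nat) : Int) + 2 ^ (32 - b) * q := by
    have hfac : (4294967296 : Int) = ((2 ^ b : Nat) : Int) * 2 ^ (32 - b) := by
      push_cast
      rw [← pow_add]
      norm_num [Nat.add_sub_cancel' (le_of_lt hb)]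
    rw [hfac, mul_assoc]
    exact Int.add_mul_ediv_left _ _ (by positivity)
  rw [hsplit]
  have h2 : (2:Int) ^ (32 - b) * q = 2 * (2 ^ (31 - b) * q) := by
    rw [← mul_assoc, ← pow_succ']
    congr 2
    omega
  rw [h2, Int.add_mul_emod_self_left, ← Int.natCast_div]
  have hcast : ((M / 2 ^ b : Nat) : Int) % 2 = ((M / 2 ^ b % 2 : Nat) : Int) := by omega
  rw [hcast]
  have hchar : M.testBit b = decide (M / 2 ^ b % 2 = 1) := by
    have := Nat.testBit_div_two_pow (n := b) M 0
    rw [Nat.testBit_zero] at this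
    simpa using this.symm
  by_cases hmb : M / 2 ^ b % 2 = 1
  · simp [hchar, hmb]
  · have : M / 2 ^ b % 2 = 0 := by omega
    simp [hchar, this]

-- scanA structure lemmas
theorem band1_cases (x : Int) : PySem.Int.band x 1 = 0 ∨ PySem.Int.band x 1 = 1 := by
  rw [PySem.Int.band_one]
  have h1 := PySem.Int.mod_nonneg x (b := 2) (by omega)
  have h2 := PySem.Int.mod_lt x (b := 2) (by omega)
  omega

theorem runA_ge (mask : Int) : ∀ (fuel b : Nat), b ≤ runA mask fuel b := by
  intro fuel
  induction fuel with
  | zero => intro b; simp [runA]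
  | succ fuel IH =>
    intro b
    rw [runA]
    split
    · exact le_trans (Nat.le_succ b) (IH (b + 1))
    · exact le_refl b

theorem scanA_stop (mask : Int) (fuel b : Nat) (h : ¬ b < 32) : scanA mask fuel b = [] := by
  cases fuel with
  | zero => rfl
  | succ fuel => rw [scanA, if_neg h]

theorem scanA_irrel (mask : Int) : ∀ (f1 f2 b : Nat), 32 - b ≤ f1 → 32 - b ≤ f2 →
    scanA mask f1 b = scanA mask f2 b := by
  intro f1
  induction f1 with
  | zero =>
    intro f2 b h1 h2
    rw [scanA_stop mask 0 b (by omega), scanA_stop mask f2 b (by omega)]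
  | succ f1 IH =>
    intro f2 b h1 h2
    by_cases hb : b < 32
    · obtain ⟨f2', rfl⟩ : ∃ x, f2 = x + 1 := ⟨f2 - 1, by omega⟩
      rw [scanA, scanA]
      by_cases hz : PySem.Int.band (mask >>> b) 1 = 0
      · rw [if_pos hb, if_pos hb, if_pos hz, if_pos hz]
        exact IH f2' (b + 1) (by omega) (by omega)
      · rw [if_pos hb, if_pos hb, if_neg hz, if_neg hz]
        have h1' : PySem.Int.band (mask >>> b) 1 = 1 := (band1_cases _).resolve_left hz
        have hge : b + 1 ≤ runA mask 32 b := by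
          rw [show (32 : Nat) = 31 + 1 from rfl, runA, if_pos ⟨hb, h1'⟩]
          exact runA_ge mask 31 (b + 1)
        congr 1
        exact IH f2' (runA mask 32 b) (by omega) (by omega)
    · rw [scanA_stop mask _ b hb, scanA_stop mask _ b hb]

theorem scanA_zeros (mask : Int) : ∀ (fuel b : Nat),
    (∀ j, b ≤ j → ((PySem.Int.band mask 4294967295).toNat).testBit j = false) →
    scanA mask fuel b = [] := by
  intro fuel
  induction fuel with
  | zero => intro b _; rfl
  | succ fuel IH =>
    intro b h
    by_cases hb : b < 32
    · rw [scanA, if_pos hb, if_pos (by rw [pyBit_eq mask b hb, h b le_rfl]; rfl)]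
      exact IH (b + 1) (fun j hj => h j (by omega))
    · exact scanA_stop mask _ b hb

theorem scanA_skip (mask : Int) (b z : Nat) (hb : b + z ≤ 32)
    (h : ∀ j, j < z → ((PySem.Int.band mask 4294967295).toNat).testBit (b + j) = false) :
    scanA mask 32 b = scanA mask 32 (b + z) := by
  induction z generalizing b with
  | zero => rfl
  | succ z IH =>
    have hb1 : b < 32 := by omega
    have hbit : ((PySem.Int.band mask 4294967295).toNat).testBit b = false := by
      have := h 0 (by omega)
      simpa using this
    conv_lhs => rw [show (32 : Nat) = 31 + 1 from rfl, scanA, if_pos hb1,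
      if_pos (by rw [pyBit_eq mask b hb1, hbit]; rfl)]
    rw [scanA_irrel mask 31 32 (b + 1) (by omega) (by omega)]
    rw [IH (b + 1) (by omega) (fun j hj => by
      have := h (j + 1) (by omega)
      rwa [show b + (j + 1) = b + 1 + j by omega] at this)]
    congr 1
    omega

theorem runA_run (mask : Int) : ∀ (t fuel b : Nat), t ≤ fuel → b + t ≤ 32 →
    (∀ j, j < t → ((PySem.Int.band mask 4294967295).toNat).testBit (b + j) = true) →
    (b + t = 32 ∨ ((PySem.Int.band mask 4294967295).toNat).testBit (b + t) = false) →
    runA mask fuel b = b + t := by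
  intro t
  induction t with
  | zero =>
    intro fuel b htf hb h1 h2
    cases fuel with
    | zero => rfl
    | succ f =>
      rw [runA, if_neg (by
        rintro ⟨hb32, h1'⟩
        rcases h2 with h2 | h2
        · omega
        · rw [pyBit_eq mask b hb32] at h1'
          simp only [Nat.add_zero] at h2
          rw [h2] at h1'
          simp at h1')]
      omega
  | succ t IH =>
    intro fuel b htf hb h1 h2
    obtain ⟨f, rfl⟩ : ∃ x, fuel = x + 1 := ⟨fuel - 1, by omega⟩
    have hb32 : b < 32 := by omega
    have hbit : ((PySem.Int.band mask 4294967295).toNat).testBit b = true := by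
      have := h1 0 (by omega)
      simpa using this
    rw [runA, if_pos ⟨hb32, by rw [pyBit_eq mask b hb32, hbit]; rfl⟩]
    have := IH f (b + 1) (by omega) (by omega)
      (fun j hj => by
        have := h1 (j + 1) (by omega)
        rwa [show b + (j + 1) = b + 1 + j by omega] at this)
      (by rcases h2 with h2 | h2
          · left; omega
          · right; rwa [show b + 1 + t = b + (t + 1) by omega])
    omega

theorem scanA_run (mask : Int) (b t : Nat) (hb : b + t ≤ 32) (ht : 1 ≤ t)
    (h1 : ∀ j, j < t → ((PySem.Int.band mask 4294967295).toNat).testBit (b + j) = true)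
    (h2 : b + t = 32 ∨ ((PySem.Int.band mask 4294967295).toNat).testBit (b + t) = false) :
    scanA mask 32 b = ((b : Int), (b : Int) + (t : Int) - 1) :: scanA mask 32 (b + t) := by
  have hb32 : b < 32 := by omega
  have hbit : ((PySem.Int.band mask 4294967295).toNat).testBit b = true := by
    have := h1 0 (by omega)
    simpa using this
  have hrun : runA mask 32 b = b + t := runA_run mask t 32 b (by omega) hb h1 h2
  conv_lhs => rw [show (32 : Nat) = 31 + 1 from rfl, scanA, if_pos hb32,
    if_neg (by rw [pyBit_eq mask b hb32, hbit]; simp)]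
  rw [hrun, scanA_irrel mask 31 32 (b + t) (by omega) (by omega)]
  simp only [List.cons.injEq, Prod.mk.injEq]
  exact ⟨⟨trivial, by push_cast; ring⟩, trivial⟩

-- main loop correspondence
set_option maxRecDepth 8192 in
theorem loopB_eq_scanA (mask : Int) : ∀ (fuel base : Nat), base ≤ 32 → 32 - base ≤ fuel →
    loopB (((PySem.Int.band mask 4294967295).toNat >>> base : Nat) : Int) (base : Int) fuel
      = scanA mask 32 base := by
  intro fuel
  induction fuel with
  | zero =>
    intro base h32 hf
    simp only [loopB]
    exact (scanA_stop mask 32 base (by omega)).symm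
  | succ fuel IH =>
    intro base h32 hf
    obtain ⟨hnn, hlt, q, hq⟩ := band_mask_spec mask
    obtain ⟨M, hMdef⟩ : ∃ m, (PySem.Int.band mask 4294967295).toNat = m := ⟨_, rfl⟩
    rw [hMdef] at hlt IH ⊢
    obtain ⟨n, hndef⟩ : ∃ x, M >>> base = x := ⟨_, rfl⟩
    rw [hndef]
    by_cases h0 : n = 0
    · rw [h0]
      simp only [loopB, Nat.cast_zero, if_true]
      refine (scanA_zeros mask 32 base fun j hj => ?_).symm
      rw [hMdef]
      have hh : M.testBit (base + (j - base)) = false := by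
        rw [← Nat.testBit_shiftRight, hndef, h0, Nat.zero_testBit]
      rwa [show base + (j - base) = j by omega] at hh
    · have hne : ((n : Nat) : Int) ≠ 0 := Int.natCast_ne_zero.mpr h0
      obtain ⟨z', hz'def⟩ : ∃ x, tz n = x := ⟨_, rfl⟩
      obtain ⟨n1, hn1def⟩ : ∃ x, n >>> z' = x := ⟨_, rfl⟩
      obtain ⟨t', ht'def⟩ : ∃ x, tz (n1 + 1) = x := ⟨_, rfl⟩
      have hn0 : 1 ≤ n := Nat.pos_of_ne_zero h0
      have hlow : (n : Int) - PySem.Int.band (n : Int) ((n : Int) - 1) = ((2 ^ z' : Nat) : Int) := by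
        rw [show ((n : Int)) - 1 = ((n - 1 : Nat) : Int) by omega, PySem.Int.band_natCast]
        have h1 := low_eq_pow_tz n h0
        have h2 : n &&& (n - 1) ≤ n := Nat.and_le_left
        rw [hz'def] at h1
        omega
      have hshift : ((n : Int)) >>> z' = ((n1 : Nat) : Int) := by
        rw [← hn1def, Int.natCast_shiftRight]
      have hlow1 : ((n1 : Nat) : Int) + 1 - PySem.Int.band (((n1 : Nat) : Int) + 1) ((n1 : Nat) : Int)
          = ((2 ^ t' : Nat) : Int) := by
        rw [show ((n1 : Nat) : Int) + 1 = ((n1 + 1 : Nat) : Int) by omega, PySem.Int.band_natCast]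
        have h1 := low_eq_pow_tz (n1 + 1) (by omega)
        rw [Nat.add_sub_cancel, ht'def] at h1
        have h2 : (n1 + 1) &&& n1 ≤ n1 + 1 := Nat.and_le_left
        omega
      obtain ⟨hz1, hz2⟩ := testBit_lt_tz n h0
      obtain ⟨ht1, ht2⟩ := testBit_lt_tz_succ n1
      rw [hz'def] at hz1 hz2
      rw [ht'def] at ht1 ht2
      have hMbit : ∀ j, n.testBit j = M.testBit (base + j) := fun j => by
        rw [← hndef, Nat.testBit_shiftRight]
      have hstart : M.testBit (base + z') = true := by rw [← hMbit z']; exact hz2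
      have hn1bit : ∀ j, n1.testBit j = M.testBit (base + z' + j) := fun j => by
        rw [← hn1def, Nat.testBit_shiftRight, hMbit (z' + j),
          show base + (z' + j) = base + z' + j by omega]
      have hrun_bits : ∀ j, j < t' → M.testBit (base + z' + j) = true := fun j hj => by
        rw [← hn1bit j]; exact ht1 j hj
      have hend : M.testBit (base + z' + t') = false := by rw [← hn1bit t']; exact ht2
      have hMlt : M < 2 ^ 32 := by
        have : (2 : Nat) ^ 32 = 4294967296 := by norm_num
        omega
      have hb32 : base + z' < 32 := by
        have h1 : 2 ^ (base + z') ≤ M := Nat.ge_two_pow_of_testBit hstart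
        exact (Nat.pow_lt_pow_iff_right (by omega)).mp (lt_of_le_of_lt h1 hMlt)
      have ht'1 : 1 ≤ t' := by
        rcases Nat.eq_zero_or_pos t' with hzero | h
        · have htr : n1.testBit 0 = true := by
            rw [hn1bit 0, show base + z' + 0 = base + z' by omega]
            exact hstart
          rw [hzero] at ht2
          rw [ht2] at htr
          exact absurd htr (by decide)
        · exact h
      have hn1lt : n1 < 2 ^ (32 - (base + z')) := by
        rw [← hn1def, ← hndef, ← Nat.shiftRight_add, Nat.shiftRight_eq_div_pow]
        apply (Nat.div_lt_iff_lt_mul (by positivity)).mpr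
        calc M < 2 ^ 32 := hMlt
          _ ≤ 2 ^ (32 - (base + z')) * 2 ^ (base + z') := by
              rw [← pow_add]
              exact Nat.pow_le_pow_right (by omega) (by omega)
      have hcap : base + z' + t' ≤ 32 := by
        have h1 : 2 ^ t' - 1 ≤ n1 := pow_sub_one_le_of_testBit t' n1 ht1
        have h2 : (2 : Nat) ^ t' ≤ 2 ^ (32 - (base + z')) := by omega
        have h3 := (Nat.pow_le_pow_iff_right (a := 2) (by omega)).mp h2
        omega
      simp only [loopB]
      rw [if_neg hne, hlow, bitLength_pow, Nat.add_sub_cancel, hshift, hlow1, bitLength_pow,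
        Nat.add_sub_cancel]
      rw [show ((n1 : Nat) : Int) >>> t' = ((n1 >>> t' : Nat) : Int) from
        (Int.natCast_shiftRight _ _).symm]
      have hrest : n1 >>> t' = M >>> (base + z' + t') := by
        rw [← hn1def, ← hndef, ← Nat.shiftRight_add, ← Nat.shiftRight_add, ← Nat.add_assoc]
      rw [hrest, show ((base : Int) + (z' : Int) + (t' : Int)) = (((base + z' + t' : Nat)) : Int)
        by push_cast; ring]
      rw [IH (base + z' + t') (by omega) (by omega)]
      rw [scanA_skip mask base z' (by omega) (fun j hj => by rw [hMdef, ← hMbit j]; exact hz1 j hj)]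
      rw [scanA_run mask (base + z') t' (by omega) ht'1
        (fun j hj => by rw [hMdef]; exact hrun_bits j hj) (Or.inr (by rw [hMdef]; exact hend))]
      simp only [List.cons.injEq, Prod.mk.injEq]
      exact ⟨⟨by push_cast; ring, by push_cast; ring⟩, trivial⟩

-- ===== VERDICT (by name: the statement is the Claim_ definition above) =====
theorem bit_ranges_py_spec : Claim_equal_bit_ranges_py := by
  intro mask _
  unfold Spec_bit_ranges_py bit_ranges_py bit_ranges_py_alt
  have h := band_mask_spec mask
  have hm : PySem.Int.band mask 4294967295 = (((PySem.Int.band mask 4294967295).toNat >>> 0 : Nat) : Int) := by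
    simp [Int.toNat_of_nonneg h.1]
  rw [hm]
  symm
  exact_mod_cast loopB_eq_scanA mask 32 0 (by omega) (by omega)
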